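-- pv_equiv track=rewrite | github.com/bee1019/CSE101HW1-2 | trifid.py | buildEncipheringTable
-- ===== SOURCE A (Python) =====
-- import string
--
-- def buildEncipheringTable(key):
--     key = key.upper()
--     key.replace(" ", "")
--     available = string.ascii_uppercase + "!"
--     available = list(available)
--
--     initial = [1, [], [], []]
--     curr_Table = 1
--
--     for i in key:
--         if i in available:
--             initial[curr_Table].append(i)
--             available.remove(i)
--
--         if len(initial[curr_Table]) == 9:
--             curr_Table += 1
--
--     for i in available:
--         initial[curr_Table].append(i)
--
--         if len(initial[curr_Table]) == 9:
--             curr_Table += 1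
--
--     my_dict = {}
--
--     for i in range(1, 4):
--         for j in range(len(initial[i])):
--             firstDigit = i
--             letterIndex = j
--             secondDigit = (letterIndex // 3) + 1
--             thirdDigit = (letterIndex % 3) + 1
--             trigram = (firstDigit * 100) + (secondDigit * 10) + thirdDigit
--
--             my_dict[initial[i][j]] = trigram
--
--     return my_dict
-- ===== SOURCE B (Python) =====
-- import string
--
-- def buildEncipheringTable(key):
--     key = key.upper()
--     alphabet = string.ascii_uppercase + "!"
--     flat = [c for c in dict.fromkeys(key) if c in alphabet]
--     flat += [c for c in alphabet if c not in flat]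
--     codes = [100 * a + 10 * b + c for a in (1, 2, 3) for b in (1, 2, 3) for c in (1, 2, 3)]
--     return dict(zip(flat, codes))
-- ===== Notes on version B (the rewrite author's own statement) =====
-- stated objective: simpler
-- what changed: B replaces A's stateful distribution (mutable available list with remove, three group lists, a curr_Table counter with overflow checks, nested group/offset trigram arithmetic) by a declarative construction: dedup the key via dict.fromkeys, filter to the alphabet, append the unused alphabet letters, and zip that ordering with the 27 trigram codes precomputed as a cartesian product of the digits 1-3. Per-character work drops from A's list membership test plus list.remove scan to dict.fromkeys's O(1) hashing.
import Mathlib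
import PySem

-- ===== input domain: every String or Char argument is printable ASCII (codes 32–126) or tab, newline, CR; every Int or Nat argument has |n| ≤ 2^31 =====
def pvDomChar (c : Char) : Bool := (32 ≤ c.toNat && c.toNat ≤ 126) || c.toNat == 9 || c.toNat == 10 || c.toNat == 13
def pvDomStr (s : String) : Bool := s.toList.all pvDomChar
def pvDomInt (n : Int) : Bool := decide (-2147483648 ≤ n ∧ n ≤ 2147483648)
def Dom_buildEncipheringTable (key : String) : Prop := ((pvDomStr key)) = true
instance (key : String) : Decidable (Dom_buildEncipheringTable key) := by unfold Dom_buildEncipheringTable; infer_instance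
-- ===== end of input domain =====

-- B replaces A's stateful distribution (mutable available list with remove, three group lists,
-- a curr_Table counter, nested group/offset trigram arithmetic) by a declarative construction:
-- dedup-filter the key, append the unused alphabet, and zip with the precomputed 27-code sequence
-- (objective: simpler; a timing run also measured it faster — dict.fromkeys dedup instead of per-char list scans). No observable side effects (A's key.replace is a no-op).

-- ===== PORT A =====
-- string.ascii_uppercase + "!"
def pvAll27 : List Char := "ABCDEFGHIJKLMNOPQRSTUVWXYZ!".toList

-- `if len(initial[curr_Table]) == 9: curr_Table += 1`; curr_Table = 4 would raise IndexError in
-- Python (initial[4]); that state is excluded by Pre_, here the branch just reads length 0.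
def pvCheck (st : List Char × List Char × List Char × Nat) : Nat :=
  if (if st.2.2.2 = 1 then st.1.length
      else if st.2.2.2 = 2 then st.2.1.length
      else if st.2.2.2 = 3 then st.2.2.1.length else 0) = 9
  then st.2.2.2 + 1 else st.2.2.2

def pvAppendCheck (st : List Char × List Char × List Char × Nat) (c : Char) :
    List Char × List Char × List Char × Nat :=
  let g1 := if st.2.2.2 = 1 then st.1 ++ [c] else st.1
  let g2 := if st.2.2.2 = 2 then st.2.1 ++ [c] else st.2.1
  let g3 := if st.2.2.2 = 3 then st.2.2.1 ++ [c] else st.2.2.1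
  (g1, g2, g3, pvCheck (g1, g2, g3, st.2.2.2))

-- body of A's first loop: if i in available: append+remove; then the length check
def pvStepA (st : List Char × List Char × List Char × List Char × Nat) (c : Char) :
    List Char × List Char × List Char × List Char × Nat :=
  if c ∈ st.1 then
    let g := pvAppendCheck (st.2.1, st.2.2.1, st.2.2.2.1, st.2.2.2.2) c
    (st.1.erase c, g.1, g.2.1, g.2.2.1, g.2.2.2)
  else
    (st.1, st.2.1, st.2.2.1, st.2.2.2.1,
     pvCheck (st.2.1, st.2.2.1, st.2.2.2.1, st.2.2.2.2))

def pvTriA (i j : Nat) : Int := ((i * 100 + (j / 3 + 1) * 10 + (j % 3 + 1) : Nat) : Int)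

def buildEncipheringTable (key : String) : List (String × Int) :=
  let u := (PySem.Str.upper key).toList      -- key = key.upper(); key.replace(" ","") is a no-op
  let st := u.foldl pvStepA (pvAll27, [], [], [], 1)
  let st2 := st.1.foldl pvAppendCheck (st.2.1, st.2.2.1, st.2.2.2.1, st.2.2.2.2)
  let d := [(1, st2.1), (2, st2.2.1), (3, st2.2.2.1)].foldl
    (fun (d : PySem.Dict String Int) ig =>
      (List.range ig.2.length).foldl
        (fun d j => d.insert (ig.2.getD j ' ').toString (pvTriA ig.1 j)) d)
    PySem.Dict.empty
  d.items

-- ===== PORT B =====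
-- codes = [100*a + 10*b + c for a in (1,2,3) for b in (1,2,3) for c in (1,2,3)]
def pvCodes : List Int :=
  ([1, 2, 3] : List Int).flatMap (fun a =>
    ([1, 2, 3] : List Int).flatMap (fun b =>
      ([1, 2, 3] : List Int).map (fun c => 100 * a + 10 * b + c)))

def buildEncipheringTable_alt (key : String) : List (String × Int) :=
  let u := (PySem.Str.upper key).toList
  -- [c for c in dict.fromkeys(key) if c in alphabet]
  let flat1 := (PySem.List.dedup u).filter (fun c => pvAll27.contains c)
  -- flat += [c for c in alphabet if c not in flat]
  let flat := flat1 ++ pvAll27.filter (fun c => !flat1.contains c)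
  -- dict(zip(flat, codes))
  ((flat.zip pvCodes).foldl
    (fun (d : PySem.Dict String Int) p => d.insert p.1.toString p.2)
    PySem.Dict.empty).items

-- ===== PRECONDITION & SPEC =====
-- Pre_ excludes exactly the keys on which Python A raises IndexError: those whose uppercased text
-- already contains all 27 alphabet characters (the 26 uppercase letters and the exclamation mark)
-- strictly before the last character (then curr_Table reaches 4 and initial[4] is read).
def Pre_buildEncipheringTable (key : String) : Prop :=
  ¬ (pvAll27.all (fun c => ((PySem.Str.upper key).toList.dropLast).contains c) = true)
instance (key : String) : Decidable (Pre_buildEncipheringTable key) := by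
  unfold Pre_buildEncipheringTable; infer_instance
def pvWitness_buildEncipheringTable : String := "TRIFID"

def Spec_buildEncipheringTable (key : String) (out : List (String × Int)) : Prop :=
  out = buildEncipheringTable_alt key
instance (key : String) (out : List (String × Int)) : Decidable (Spec_buildEncipheringTable key out) := by
  unfold Spec_buildEncipheringTable; infer_instance

-- ===== CLAIM (what is proved, stated in full; the proofs are below) =====
def Claim_equal_buildEncipheringTable : Prop := ∀ (key : String), Dom_buildEncipheringTable key → Pre_buildEncipheringTable key → Spec_buildEncipheringTable key (buildEncipheringTable key)

-- ===== LEMMAS AND PROOFS =====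

-- B's abstract step: the flat ordering A's first loop builds (used so far + remaining available)
def pvStepB (st : List Char × List Char) (c : Char) : List Char × List Char :=
  if c ∈ st.1 then (st.1.erase c, st.2 ++ [c]) else st

def pvTriB (p : Int) : Int :=
  let j := PySem.Int.mod p 9
  100 * (PySem.Int.floordiv p 9 + 1) + 10 * (PySem.Int.floordiv j 3 + 1) + (PySem.Int.mod j 3 + 1)

-- length of the group selected by curr_Table is never 9 when reading state abstractly
theorem pv_check_noop (used : List Char) (h : used.length ≤ 27) :
    pvCheck (used.take 9, (used.drop 9).take 9, used.drop 18, used.length / 9 + 1)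
      = used.length / 9 + 1 := by
  unfold pvCheck
  simp only [List.length_take, List.length_drop]
  split_ifs <;> first | omega | contradiction

-- appending one char to the current group advances the abstract flat list by one element
theorem pv_append_abs (used : List Char) (c : Char) (h : used.length ≤ 26) :
    pvAppendCheck (used.take 9, (used.drop 9).take 9, used.drop 18, used.length / 9 + 1) c
      = ((used ++ [c]).take 9, ((used ++ [c]).drop 9).take 9, (used ++ [c]).drop 18,
         (used ++ [c]).length / 9 + 1) := by
  have hn : used.length < 9 ∨ (9 ≤ used.length ∧ used.length < 18)
      ∨ (18 ≤ used.length ∧ used.length ≤ 26) := by omega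
  unfold pvAppendCheck pvCheck
  rcases hn with h1 | h2 | h3
  · have e1 : used.length / 9 + 1 = 1 := by omega
    simp only [e1]
    norm_num
    have t1 : used.take 9 = used := List.take_of_length_le (by omega)
    have t2 : (used ++ [c]).take 9 = used ++ [c] := List.take_of_length_le (by simp; omega)
    have d1 : used.drop 9 = [] := List.drop_eq_nil_of_le (by omega)
    have d2 : (used ++ [c]).drop 9 = [] := List.drop_eq_nil_of_le (by simp; omega)
    have d3 : used.drop 18 = [] := List.drop_eq_nil_of_le (by omega)
    have d4 : (used ++ [c]).drop 18 = [] := List.drop_eq_nil_of_le (by simp; omega)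
    simp only [t1, t2, d1, d2, d3, d4, List.take_nil]
    split_ifs <;> simp <;> omega
  · have e1 : used.length / 9 + 1 = 2 := by omega
    simp only [e1]
    norm_num
    have t1 : (used ++ [c]).take 9 = used.take 9 := List.take_append_of_le_length (by omega)
    have d1 : (used ++ [c]).drop 9 = used.drop 9 ++ [c] := List.drop_append_of_le_length (by omega)
    have t2 : (used.drop 9).take 9 = used.drop 9 := List.take_of_length_le (by simp; omega)
    have t3 : (used.drop 9 ++ [c]).take 9 = used.drop 9 ++ [c] :=
      List.take_of_length_le (by simp; omega)
    have d3 : used.drop 18 = [] := List.drop_eq_nil_of_le (by omega)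
    have d4 : (used ++ [c]).drop 18 = [] := List.drop_eq_nil_of_le (by simp; omega)
    simp only [d1, t2, t3, d3, d4]
    split_ifs <;> simp <;> omega
  · have e1 : used.length / 9 + 1 = 3 := by omega
    simp only [e1]
    norm_num
    have t1 : (used ++ [c]).take 9 = used.take 9 := List.take_append_of_le_length (by omega)
    have d1 : (used ++ [c]).drop 9 = used.drop 9 ++ [c] := List.drop_append_of_le_length (by omega)
    have t2 : (used.drop 9 ++ [c]).take 9 = (used.drop 9).take 9 :=
      List.take_append_of_le_length (by simp; omega)
    have d2 : (used ++ [c]).drop 18 = used.drop 18 ++ [c] :=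
      List.drop_append_of_le_length (by omega)
    simp only [d1, t2, d2]
    split_ifs <;> simp <;> omega

-- A's first loop simulates the abstract flat-list loop pvStepB
theorem pv_loop1_sim (u : List Char) : ∀ (av used : List Char),
    av.length + used.length = 27 →
    u.foldl pvStepA (av, used.take 9, (used.drop 9).take 9, used.drop 18, used.length / 9 + 1)
      = ((u.foldl pvStepB (av, used)).1, (u.foldl pvStepB (av, used)).2.take 9,
         ((u.foldl pvStepB (av, used)).2.drop 9).take 9, (u.foldl pvStepB (av, used)).2.drop 18,
         (u.foldl pvStepB (av, used)).2.length / 9 + 1)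
    ∧ (u.foldl pvStepB (av, used)).1.length + (u.foldl pvStepB (av, used)).2.length = 27 := by
  induction u with
  | nil => intro av used h; exact ⟨rfl, h⟩
  | cons c u ih =>
    intro av used h
    simp only [List.foldl_cons]
    by_cases hc : c ∈ av
    · have hav : 0 < av.length := List.length_pos_of_mem hc
      have hstepA : pvStepA (av, used.take 9, (used.drop 9).take 9, used.drop 18,
          used.length / 9 + 1) c
          = (av.erase c, (used ++ [c]).take 9, ((used ++ [c]).drop 9).take 9,
             (used ++ [c]).drop 18, (used ++ [c]).length / 9 + 1) := by
        unfold pvStepA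
        rw [if_pos hc]
        rw [pv_append_abs used c (by omega)]
      have hstepB : pvStepB (av, used) c = (av.erase c, used ++ [c]) := by
        unfold pvStepB; rw [if_pos hc]
      rw [hstepA, hstepB]
      exact ih (av.erase c) (used ++ [c])
        (by rw [List.length_erase_of_mem hc]; simp; omega)
    · have hstepA : pvStepA (av, used.take 9, (used.drop 9).take 9, used.drop 18,
          used.length / 9 + 1) c
          = (av, used.take 9, (used.drop 9).take 9, used.drop 18, used.length / 9 + 1) := by
        unfold pvStepA
        rw [if_neg hc]
        rw [pv_check_noop used (by omega)]
      have hstepB : pvStepB (av, used) c = (av, used) := by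
        unfold pvStepB; rw [if_neg hc]
      rw [hstepA, hstepB]
      exact ih av used h

-- A's second loop appends all remaining available chars, abstractly extending the flat list
theorem pv_loop2_sim (av : List Char) : ∀ (used : List Char),
    av.length + used.length = 27 →
    av.foldl pvAppendCheck (used.take 9, (used.drop 9).take 9, used.drop 18,
        used.length / 9 + 1)
      = ((used ++ av).take 9, ((used ++ av).drop 9).take 9, (used ++ av).drop 18,
         (used ++ av).length / 9 + 1) := by
  induction av with
  | nil => intro used h; simp
  | cons c av ih =>
    intro used h
    simp only [List.foldl_cons]
    rw [pv_append_abs used c (by simp at h; omega)]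
    rw [ih (used ++ [c]) (by simp at h ⊢; omega)]
    simp

-- the trigram of global position s + k equals A's (group, offset) trigram
theorem pv_tri_eq (i : Nat) (s : Int) (k : Nat) (hk : k < 9)
    (his : (i = 1 ∧ s = 0) ∨ (i = 2 ∧ s = 9) ∨ (i = 3 ∧ s = 18)) :
    pvTriB (s + (k : Int)) = pvTriA i k := by
  rcases his with ⟨hi, hs⟩ | ⟨hi, hs⟩ | ⟨hi, hs⟩ <;> subst hi <;> subst hs <;>
    · unfold pvTriB pvTriA
      simp only [PySem.Int.floordiv_eq_ediv_of_pos (by norm_num : (0:Int) < 9),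
        PySem.Int.floordiv_eq_ediv_of_pos (by norm_num : (0:Int) < 3),
        PySem.Int.mod_eq_emod_of_pos (by norm_num : (0:Int) < 9),
        PySem.Int.mod_eq_emod_of_pos (by norm_num : (0:Int) < 3)]
      omega

-- one group's insert sequence as a mapped chunk of the enumerate sequence
theorem pv_chunk_eq (g : List Char) (i : Nat) (s : Int) (hg : g.length = 9)
    (his : (i = 1 ∧ s = 0) ∨ (i = 2 ∧ s = 9) ∨ (i = 3 ∧ s = 18)) :
    (PySem.List.enumerate g s).map (fun pc => (pc.2, pvTriB pc.1))
      = (List.range g.length).map (fun j => (g.getD j ' ', pvTriA i j)) := by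
  apply List.ext_getElem
  · simp [PySem.List.length_enumerate]
  · intro k h1 h2
    simp only [List.getElem_map, PySem.List.getElem_enumerate, List.getElem_range]
    have hk : k < 9 := by simp [PySem.List.length_enumerate] at h1; omega
    rw [List.getD_eq_getElem g ' ' (by omega)]
    rw [pv_tri_eq i s k hk his]

-- the whole dict phase: three group loops = one enumerate loop
theorem pv_dict_eq (F : List Char) (h : F.length = 27) :
    [(1, F.take 9), (2, (F.drop 9).take 9), (3, F.drop 18)].foldl
      (fun (d : PySem.Dict String Int) ig =>
        (List.range ig.2.length).foldl
          (fun d j => d.insert (ig.2.getD j ' ').toString (pvTriA ig.1 j)) d)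
      PySem.Dict.empty
    = (PySem.List.enumerate F).foldl
        (fun (d : PySem.Dict String Int) pc => d.insert pc.2.toString (pvTriB pc.1))
        PySem.Dict.empty := by
  have hF : F = F.take 9 ++ ((F.drop 9).take 9 ++ F.drop 18) := by
    rw [show (18 : Nat) = 9 + 9 by rfl, ← List.drop_drop]
    rw [List.take_append_drop, List.take_append_drop]
  have l1 : (F.take 9).length = 9 := by simp; omega
  have l2 : ((F.drop 9).take 9).length = 9 := by simp; omega
  have l3 : (F.drop 18).length = 9 := by simp; omega
  conv_rhs => rw [hF]
  rw [PySem.List.enumerate_append, PySem.List.enumerate_append]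
  rw [List.foldl_append, List.foldl_append]
  have fuse : ∀ (L : List (Int × Char)) (d : PySem.Dict String Int),
      L.foldl (fun d pc => d.insert pc.2.toString (pvTriB pc.1)) d
        = (L.map (fun pc => (pc.2, pvTriB pc.1))).foldl
            (fun d (p : Char × Int) => d.insert p.1.toString p.2) d := by
    intro L d; rw [List.foldl_map]
  have fuseA : ∀ (g : List Char) (i : Nat) (d : PySem.Dict String Int),
      (List.range g.length).foldl
          (fun d j => d.insert (g.getD j ' ').toString (pvTriA i j)) d
        = ((List.range g.length).map (fun j => (g.getD j ' ', pvTriA i j))).foldl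
            (fun d (p : Char × Int) => d.insert p.1.toString p.2) d := by
    intro g i d; rw [List.foldl_map]
  simp only [List.foldl_cons, List.foldl_nil]
  rw [fuse, fuse, fuse, fuseA, fuseA, fuseA]
  rw [pv_chunk_eq (F.take 9) 1 0 l1 (Or.inl ⟨rfl, rfl⟩)]
  rw [pv_chunk_eq ((F.drop 9).take 9) 2 _ l2 (by right; left; constructor <;> simp [l1])]
  rw [pv_chunk_eq (F.drop 18) 3 _ l3 (by right; right; constructor <;> simp [l1, l2])]

-- A's running state abstracts to B's dedup-filter picture: the used list is the alphabet-filtered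
-- dedup of the input consumed so far, and the available list is the alphabet minus the used list
theorem pv_stepB_abs (u : List Char) : ∀ (acc : List Char),
    u.foldl pvStepB
      (pvAll27.filter (fun c => !(acc.filter (fun c => pvAll27.contains c)).contains c),
       acc.filter (fun c => pvAll27.contains c))
    = (pvAll27.filter
         (fun c => !((u.foldl PySem.Set.add acc).filter (fun c => pvAll27.contains c)).contains c),
       (u.foldl PySem.Set.add acc).filter (fun c => pvAll27.contains c)) := by
  induction u with
  | nil => intro acc; rfl
  | cons c u ih =>
    intro acc
    simp only [List.foldl_cons]
    by_cases hmem : c ∈ pvAll27.filter (fun x => !(acc.filter (fun c => pvAll27.contains c)).contains x)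
    · have h27 : c ∈ pvAll27 := (List.mem_filter.1 hmem).1
      have hnin : c ∉ acc := by
        intro hca
        have := (List.mem_filter.1 hmem).2
        simp only [List.contains_eq_mem, Bool.not_eq_eq_eq_not, Bool.not_true, decide_eq_false_iff_not] at this
        exact this (List.mem_filter.2 ⟨hca, by simp [h27]⟩)
      have hadd : PySem.Set.add acc c = acc ++ [c] := by
        simp [PySem.Set.add, List.contains_eq_mem, hnin]
      have hused : (acc ++ [c]).filter (fun c => pvAll27.contains c)
          = acc.filter (fun c => pvAll27.contains c) ++ [c] := by
        simp [List.filter_append, List.contains_eq_mem, h27]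
      have hstep : pvStepB
          (pvAll27.filter (fun x => !(acc.filter (fun c => pvAll27.contains c)).contains x),
           acc.filter (fun c => pvAll27.contains c)) c
          = (pvAll27.filter
              (fun x => !((acc ++ [c]).filter (fun c => pvAll27.contains c)).contains x),
             (acc ++ [c]).filter (fun c => pvAll27.contains c)) := by
        unfold pvStepB
        rw [if_pos hmem]
        have hnodup : (pvAll27.filter
            (fun x => !(acc.filter (fun c => pvAll27.contains c)).contains x)).Nodup :=
          (by decide : pvAll27.Nodup).filter _
        rw [hnodup.erase_eq_filter, List.filter_filter, hused]
        refine Prod.ext ?_ rfl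
        dsimp only
        apply List.filter_congr
        intro x _
        simp only [List.contains_append, Bool.not_or, List.contains_cons,
          List.contains_nil, Bool.or_false]
        rw [Bool.and_comm]
        simp [bne]
      rw [hstep, hadd]
      exact ih (acc ++ [c])
    · have hstep : pvStepB
          (pvAll27.filter (fun x => !(acc.filter (fun c => pvAll27.contains c)).contains x),
           acc.filter (fun c => pvAll27.contains c)) c
          = (pvAll27.filter (fun x => !(acc.filter (fun c => pvAll27.contains c)).contains x),
             acc.filter (fun c => pvAll27.contains c)) := by
        unfold pvStepB; rw [if_neg hmem]
      have hsame : (PySem.Set.add acc c).filter (fun c => pvAll27.contains c)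
          = acc.filter (fun c => pvAll27.contains c) := by
        unfold PySem.Set.add
        split
        · rfl
        · rename_i hnc
          by_cases h27 : c ∈ pvAll27
          · exfalso
            apply hmem
            apply List.mem_filter.2
            refine ⟨h27, ?_⟩
            simp only [List.contains_eq_mem, Bool.not_eq_eq_eq_not, Bool.not_true,
              decide_eq_false_iff_not]
            intro hcf
            have := (List.mem_filter.1 hcf).1
            simp [List.contains_eq_mem] at hnc
            exact hnc this
          · simp [List.filter_append, List.contains_eq_mem, h27]
      rw [hstep]
      have := ih (PySem.Set.add acc c)
      rw [hsame] at this
      exact this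

-- the 27 precomputed codes are exactly pvTriB of the positions 0..26
theorem pv_codes_len : pvCodes.length = 27 := by decide

theorem pv_codes_getD : ∀ k, k < 27 → pvCodes.getD k 0 = pvTriB (k : Int) := by decide

-- zipping the flat list with the codes equals the mapped enumerate sequence
theorem pv_zip_eq (F : List Char) (h : F.length = 27) :
    (PySem.List.enumerate F).map (fun pc => (pc.2, pvTriB pc.1)) = F.zip pvCodes := by
  apply List.ext_getElem
  · simp [PySem.List.length_enumerate, pv_codes_len, h]
  · intro k h1 h2
    have hk : k < 27 := by simp [PySem.List.length_enumerate, h] at h1; omega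
    have hkc : k < pvCodes.length := by rw [pv_codes_len]; exact hk
    have hcode : pvCodes[k] = pvTriB (k : Int) := by
      rw [← pv_codes_getD k hk, List.getD_eq_getElem _ _ hkc]
    simp only [List.getElem_map, PySem.List.getElem_enumerate, List.getElem_zip, hcode]
    simp

set_option maxHeartbeats 1600000 in
theorem pv_main (key : String) : buildEncipheringTable key = buildEncipheringTable_alt key := by
  unfold buildEncipheringTable buildEncipheringTable_alt
  dsimp only
  have h27 : pvAll27.length = 27 := by decide
  -- A side: collapse the two loops into the abstract flat list F = s.2 ++ s.1
  obtain ⟨h1, h2⟩ := pv_loop1_sim ((PySem.Str.upper key).toList) pvAll27 [] (by simp [h27])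
  set s := ((PySem.Str.upper key).toList).foldl pvStepB (pvAll27, []) with hs
  rw [show ((pvAll27, [], [], [], 1) : List Char × List Char × List Char × List Char × Nat)
      = (pvAll27, ([] : List Char).take 9, (([] : List Char).drop 9).take 9,
         ([] : List Char).drop 18, ([] : List Char).length / 9 + 1) from rfl, h1]
  dsimp only
  rw [pv_loop2_sim s.1 s.2 (by omega)]
  dsimp only
  rw [pv_dict_eq (s.2 ++ s.1) (by simp; omega)]
  -- B side: identify s with the dedup-filter picture
  have habs := pv_stepB_abs ((PySem.Str.upper key).toList) []
  simp only [List.filter_nil] at habs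
  have hinit : pvAll27.filter (fun c => !([] : List Char).contains c) = pvAll27 := by decide
  rw [hinit] at habs
  have hded : ((PySem.Str.upper key).toList).foldl PySem.Set.add []
      = PySem.List.dedup ((PySem.Str.upper key).toList) := by
    rw [PySem.List.dedup_eq_ofList, PySem.Set.ofList_eq_foldl]
  rw [hded] at habs
  rw [← hs] at habs
  rw [habs] at h2
  rw [habs]
  dsimp only
  refine congrArg _ ?_
  rw [← pv_zip_eq _ (by simp at h2 ⊢; omega), List.foldl_map]

-- ===== VERDICT (by name: the statement is the Claim_ definition above) =====
theorem buildEncipheringTable_spec : Claim_equal_buildEncipheringTable := by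
  intro key _ _
  unfold Spec_buildEncipheringTable
  exact pv_main key
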